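-- pv_equiv track=rewrite | github.com/jonha892/AdventOfCode | 2019/d21.py | encode_prog
-- ===== SOURCE A (Python) =====
-- def encode_prog(p, w=False):
--     e = 'WALK'
--     if w:
--         e = 'RUN'
--     r = []
--     for l in p:
--         x = [ord(c) for c in l] + [10]
--         r += x
--     r = r + [ord(c) for c in e] + [10]
--     return r
-- ===== SOURCE B (Python) =====
-- def encode_prog(p, w=False):
--     e = 'RUN' if w else 'WALK'
--     s = '\n'.join(list(p) + [e]) + '\n'
--     return [ord(c) for c in s]
-- ===== Notes on version B (the rewrite author's own statement) =====
-- stated objective: simpler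
-- what changed: Replaces the per-line loop with manual [10] sentinel appends and repeated list concatenation by prebuilding the whole program text with '\n'.join plus a trailing newline and mapping ord once over it.
import Mathlib
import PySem

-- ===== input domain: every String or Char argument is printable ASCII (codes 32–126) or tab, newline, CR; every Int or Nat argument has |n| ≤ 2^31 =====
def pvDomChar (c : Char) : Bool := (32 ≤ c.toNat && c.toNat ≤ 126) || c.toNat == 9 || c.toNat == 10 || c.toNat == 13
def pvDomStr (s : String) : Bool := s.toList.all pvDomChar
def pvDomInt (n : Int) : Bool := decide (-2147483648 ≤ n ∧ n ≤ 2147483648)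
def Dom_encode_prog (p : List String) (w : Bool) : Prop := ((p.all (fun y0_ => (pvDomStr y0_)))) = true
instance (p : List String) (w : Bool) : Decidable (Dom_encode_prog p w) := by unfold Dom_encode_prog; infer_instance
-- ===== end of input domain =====

-- B prebuilds the whole program text with a '\n'-join plus trailing newline and maps ord once, instead of A's per-line loop with manual sentinel appends (objective: simpler).

-- ===== PORT A =====
def encode_prog (p : List String) (w : Bool) : List Int :=
  let e : String := if w then "RUN" else "WALK"
  let r : List Int :=
    p.foldl (fun r l => r ++ (l.toList.map (fun c => (c.toNat : Int)) ++ [10])) []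
  r ++ e.toList.map (fun c => (c.toNat : Int)) ++ [10]

-- ===== PORT B =====
def encode_prog_alt (p : List String) (w : Bool) : List Int :=
  let e : String := if w then "RUN" else "WALK"
  let s : List Char := PySem.Chars.join ['\n'] ((p ++ [e]).map String.toList) ++ ['\n']
  s.map (fun c => (c.toNat : Int))

-- ===== PRECONDITION & SPEC =====
def Spec_encode_prog (p : List String) (w : Bool) (out : List Int) : Prop := out = encode_prog_alt p w
instance (p : List String) (w : Bool) (out : List Int) : Decidable (Spec_encode_prog p w out) := by unfold Spec_encode_prog; infer_instance

-- ===== CLAIM (what is proved, stated in full; the proofs are below) =====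
def Claim_equal_encode_prog : Prop := ∀ (p : List String) (w : Bool), Dom_encode_prog p w → Spec_encode_prog p w (encode_prog p w)

-- ===== LEMMAS AND PROOFS =====

theorem join_newline_ord (p : List String) (e : String) :
    (p.flatMap (fun l => l.toList.map (fun c => (c.toNat : Int)) ++ [10]))
      ++ e.toList.map (fun c => (c.toNat : Int)) ++ [10]
    = (PySem.Chars.join ['\n'] ((p ++ [e]).map String.toList) ++ ['\n']).map
        (fun c => (c.toNat : Int)) := by
  induction p with
  | nil =>
      simp [PySem.Chars.join_singleton]
  | cons a p ih =>
      have hnl : (('\n'.toNat : Nat) : Int) = 10 := by decide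
      have hcc : PySem.Chars.join ['\n'] (a.toList :: (p.map String.toList ++ [e.toList]))
          = a.toList ++ '\n' :: PySem.Chars.join ['\n'] (p.map String.toList ++ [e.toList]) := by
        cases p <;> simp [PySem.Chars.join_cons_cons]
      simp only [List.map_append, List.map_cons, List.map_nil, hnl] at ih
      simp only [List.cons_append, List.map_cons, List.flatMap_cons, List.map_append,
        List.map_nil, hcc, hnl, ← ih, List.append_assoc]
      simp

theorem encode_prog_eq (p : List String) (w : Bool) :
    encode_prog p w = encode_prog_alt p w := by
  unfold encode_prog encode_prog_alt
  rw [PySem.List.foldl_append_eq_flatMap, List.nil_append]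
  exact join_newline_ord p _

-- ===== VERDICT (by name: the statement is the Claim_ definition above) =====
theorem encode_prog_spec : Claim_equal_encode_prog := by
  intro p w _
  exact encode_prog_eq p w
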